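-- pv_equiv track=rewrite | github.com/brentonk/us_diplomatic_missions | transition_extraction/diagnose.py | _compute_ranges
-- ===== SOURCE A (Python) =====
-- LEGATION_OR_HIGHER = frozenset({
--     "Embassy",
--     "Ambassador Nonresident",
--     "Legation",
--     "Envoy Nonresident",
-- })
--
-- DateTuple = tuple[int, int, int]
--
-- Range = tuple[DateTuple, DateTuple | None]
--
-- def _compute_ranges(
--     events: list[tuple[DateTuple, str]],
-- ) -> list[Range]:
--     """Compute date ranges where status is at legation level or higher."""
--     ranges: list[Range] = []
--     above = False
--     start: DateTuple | None = None
--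
--     for date, status in events:
--         now_above = status in LEGATION_OR_HIGHER
--         if now_above and not above:
--             start = date
--             above = True
--         elif not now_above and above:
--             ranges.append((start, date))  # type: ignore[arg-type]
--             above = False
--
--     if above and start is not None:
--         ranges.append((start, None))
--
--     return ranges
-- ===== SOURCE B (Python) =====
-- LEGATION_OR_HIGHER = frozenset({
--     "Embassy",
--     "Ambassador Nonresident",
--     "Legation",
--     "Envoy Nonresident",
-- })
--
--
-- def _emit(runs):
--     """Turn a list of (is_above, first_date) runs into ranges via lookahead."""
--     if not runs:
--         return []
--     (is_above, first), rest = runs[0], runs[1:]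
--     tail = _emit(rest)
--     if not is_above:
--         return tail
--     end = rest[0][1] if rest else None
--     return [(first, end)] + tail
--
--
-- def _compute_ranges(events):
--     """Compute date ranges where status is at legation level or higher."""
--     runs = []  # maximal runs of equal above-ness: (is_above, first_date)
--     for date, status in events:
--         key = status in LEGATION_OR_HIGHER
--         if not runs or runs[-1][0] != key:
--             runs.append((key, date))
--     return _emit(runs)
-- ===== Notes on version B (the rewrite author's own statement) =====
-- stated objective: alternative
-- what changed: Replaced A's incremental transition flag (above/start state machine) by a build-runs-then-map decomposition: first group events into maximal runs of equal above-ness keeping each run's first date, then emit (run_start, next_run_start-or-None) for each above run by lookahead.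
import Mathlib
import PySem

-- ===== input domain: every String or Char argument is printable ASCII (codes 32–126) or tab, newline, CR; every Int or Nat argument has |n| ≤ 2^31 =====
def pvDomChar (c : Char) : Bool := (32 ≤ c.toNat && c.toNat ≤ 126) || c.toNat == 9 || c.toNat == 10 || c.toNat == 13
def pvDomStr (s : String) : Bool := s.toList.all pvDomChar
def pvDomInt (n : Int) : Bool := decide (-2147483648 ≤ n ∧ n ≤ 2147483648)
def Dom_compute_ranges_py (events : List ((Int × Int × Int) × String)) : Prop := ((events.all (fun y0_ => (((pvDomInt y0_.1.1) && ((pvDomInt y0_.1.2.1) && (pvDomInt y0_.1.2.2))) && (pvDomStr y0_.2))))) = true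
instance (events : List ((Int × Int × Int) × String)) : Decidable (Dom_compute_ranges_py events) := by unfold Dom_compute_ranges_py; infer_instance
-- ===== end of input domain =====

-- ===== PORT A =====
-- Port of A: the incremental transition-flag scan (above/start state machine).
-- B restructures it as build-maximal-runs, then emit ranges by lookahead; alternative decomposition, same O(n) cost.
def LEGATION_OR_HIGHER : List String :=
  ["Embassy", "Ambassador Nonresident", "Legation", "Envoy Nonresident"]

def isAboveStatus (status : String) : Bool := LEGATION_OR_HIGHER.contains status

-- the for-loop of A as structural recursion over the same state (ranges, above, start);
-- the trailing `if above and start is not None` append happens at the end of the list.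
-- `start.getD (0,0,0)`: in Python `start` is provably not None on that branch (above = True only after start is set).
def loopA : List ((Int × Int × Int) × String) → Bool → Option (Int × Int × Int) →
    List ((Int × Int × Int) × Option (Int × Int × Int)) → List ((Int × Int × Int) × Option (Int × Int × Int))
  | [], above, start, ranges =>
      if above then
        match start with
        | some s => ranges ++ [(s, none)]
        | none => ranges
      else ranges
  | (date, status) :: rest, above, start, ranges =>
      let nowAbove := isAboveStatus status
      if nowAbove && !above then loopA rest true (some date) ranges
      else if !nowAbove && above then loopA rest false start (ranges ++ [(start.getD (0,0,0), some date)])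
      else loopA rest above start ranges

def compute_ranges_py (events : List ((Int × Int × Int) × String)) : List ((Int × Int × Int) × (Option (Int × Int × Int))) :=
  loopA events false none []

-- ===== PORT B =====
-- port of Source B's _emit (recursion on the runs list, lookahead into rest for the closing date)
def emitRuns : List (Bool × (Int × Int × Int)) → List ((Int × Int × Int) × Option (Int × Int × Int))
  | [] => []
  | (isAbove, first) :: rest =>
      let tail := emitRuns rest
      if !isAbove then tail
      else
        let «end» : Option (Int × Int × Int) := match rest with
          | [] => none
          | (_, d) :: _ => some d
        [(first, «end»)] ++ tail

-- port of Source B's run-building loop: recursion over events with the `runs` accumulator,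
-- appending (key, date) when the list is empty or the last key differs
def buildRuns : List ((Int × Int × Int) × String) → List (Bool × (Int × Int × Int)) → List (Bool × (Int × Int × Int))
  | [], runs => runs
  | (date, status) :: rest, runs =>
      let key := isAboveStatus status
      if runs.isEmpty || ((runs.getLast?).map Prod.fst != some key) then
        buildRuns rest (runs ++ [(key, date)])
      else buildRuns rest runs

def compute_ranges_py_alt (events : List ((Int × Int × Int) × String)) : List ((Int × Int × Int) × (Option (Int × Int × Int))) :=
  emitRuns (buildRuns events [])

-- ===== PRECONDITION & SPEC =====
def Spec_compute_ranges_py (events : List ((Int × Int × Int) × String)) (out : List ((Int × Int × Int) × (Option (Int × Int × Int)))) : Prop := out = compute_ranges_py_alt events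
instance (events : List ((Int × Int × Int) × String)) (out : List ((Int × Int × Int) × (Option (Int × Int × Int)))) : Decidable (Spec_compute_ranges_py events out) := by unfold Spec_compute_ranges_py; infer_instance

-- ===== CLAIM (what is proved, stated in full; the proofs are below) =====
def Claim_equal_compute_ranges_py : Prop := ∀ (events : List ((Int × Int × Int) × String)), Dom_compute_ranges_py events → Spec_compute_ranges_py events (compute_ranges_py events)

-- ===== LEMMAS AND PROOFS =====

-- the tail of the runs list after an event with key k, ignoring the current run's first date
def runsTail (k : Bool) : List ((Int × Int × Int) × String) → List (Bool × (Int × Int × Int))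
  | [] => []
  | (date, status) :: rest =>
      if isAboveStatus status == k then runsTail k rest
      else (isAboveStatus status, date) :: runsTail (isAboveStatus status) rest

lemma buildRuns_spec (evs : List ((Int × Int × Int) × String)) :
    ∀ (pre : List (Bool × (Int × Int × Int))) (k : Bool) (d : (Int × Int × Int)),
      buildRuns evs (pre ++ [(k, d)]) = pre ++ (k, d) :: runsTail k evs := by
  induction evs with
  | nil => intro pre k d; simp [buildRuns, runsTail]
  | cons e rest ih =>
      intro pre k d
      obtain ⟨date, status⟩ := e
      by_cases h : isAboveStatus status = k
      · simp [buildRuns, runsTail, h]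
        exact ih pre k d
      · have h2 : (isAboveStatus status == k) = false := by simp [h]
        simp [buildRuns, runsTail, h2]
        rw [if_neg (Ne.symm h)]
        have := ih (pre ++ [(k, d)]) (isAboveStatus status) date
        simpa using this

lemma buildRuns_nil_cons (date : Int × Int × Int) (status : String)
    (rest : List ((Int × Int × Int) × String)) :
    buildRuns ((date, status) :: rest) [] =
      (isAboveStatus status, date) :: runsTail (isAboveStatus status) rest := by
  have := buildRuns_spec rest ([] : List (Bool × (Int × Int × Int))) (isAboveStatus status) date
  simp [buildRuns]
  simpa using this

lemma loopA_spec (evs : List ((Int × Int × Int) × String)) :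
    (∀ (start : Option (Int × Int × Int)) (ranges : List ((Int × Int × Int) × Option (Int × Int × Int))),
        loopA evs false start ranges = ranges ++ emitRuns (runsTail false evs)) ∧
    (∀ (s : (Int × Int × Int)) (ranges : List ((Int × Int × Int) × Option (Int × Int × Int))),
        loopA evs true (some s) ranges = ranges ++ emitRuns ((true, s) :: runsTail true evs)) := by
  induction evs with
  | nil => constructor <;> intro a b <;> simp [loopA, runsTail, emitRuns]
  | cons e rest ih =>
      obtain ⟨date, status⟩ := e
      obtain ⟨ihF, ihT⟩ := ih
      constructor
      · intro start ranges
        by_cases h : isAboveStatus status = true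
        · simp [loopA, runsTail, h, ihT date ranges]
        · simp at h
          simp [loopA, runsTail, h, ihF start ranges]
      · intro s ranges
        by_cases h : isAboveStatus status = true
        · simp [loopA, runsTail, h, ihT s ranges]
        · simp at h
          simp [loopA, runsTail, h, emitRuns, ihF]

-- ===== VERDICT (by name: the statement is the Claim_ definition above) =====
theorem compute_ranges_py_spec : Claim_equal_compute_ranges_py := by
  intro events _
  unfold Spec_compute_ranges_py compute_ranges_py compute_ranges_py_alt
  cases events with
  | nil => simp [loopA, buildRuns, emitRuns]
  | cons e rest =>
      obtain ⟨date, status⟩ := e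
      rw [buildRuns_nil_cons]
      by_cases h : isAboveStatus status = true
      · simp [loopA, h, (loopA_spec rest).2 date []]
      · simp at h
        simp [loopA, h, emitRuns, (loopA_spec rest).1 none []]
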